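-- pv_equiv track=rewrite | github.com/roycesalah/Data-Structures-and-Algorithms | c6_genomeassembly/week3/optimal-k.py | koptimal
-- ===== SOURCE A (Python) =====
-- def koptimal(reads,k):
--     suffix = set()
--     prefix = set()
--     kmers = set()
--
--     for read in reads:
--         for i in range(len(read)-k+1):
--             kmers.add(read[i:i+k])
--
--     for kmer in kmers:
--         suffix.add(kmer[1:])
--         prefix.add(kmer[:-1])
--
--     return suffix == prefix
-- ===== SOURCE B (Python) =====
-- def koptimal(reads, k):
--     # One dict of 2-bit flags per (k-1)-mer: bit 1 = seen as a k-mer suffix,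
--     # bit 2 = seen as a k-mer prefix; equal sets iff every flag is 3.
--     flags = {}
--     m = k - 1
--     for read in reads:
--         n = len(read)
--         for j in range(1, n - k + 2):
--             flags[read[j:j+m]] = flags.get(read[j:j+m], 0) | 1
--         for j in range(0, n - k + 1):
--             flags[read[j:j+m]] = flags.get(read[j:j+m], 0) | 2
--     return all(v == 3 for v in flags.values())
-- ===== Notes on version B (the rewrite author's own statement) =====
-- stated objective: alternative
-- what changed: B replaces A's k-mer set plus two suffix/prefix sets and set comparison by a single dict mapping each (k-1)-mer, sliced directly from the read at shifted indices, to a 2-bit flag (bit 1 = seen as a k-mer suffix, bit 2 = seen as a k-mer prefix), returning whether every flag equals 3.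
-- outside the precondition, e.g. on koptimal(['ab'], 0): A returns True, B returns False; on koptimal(['bbbaa', 'bb', 'baa'], -3): A returns False, B returns True
import Mathlib
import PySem

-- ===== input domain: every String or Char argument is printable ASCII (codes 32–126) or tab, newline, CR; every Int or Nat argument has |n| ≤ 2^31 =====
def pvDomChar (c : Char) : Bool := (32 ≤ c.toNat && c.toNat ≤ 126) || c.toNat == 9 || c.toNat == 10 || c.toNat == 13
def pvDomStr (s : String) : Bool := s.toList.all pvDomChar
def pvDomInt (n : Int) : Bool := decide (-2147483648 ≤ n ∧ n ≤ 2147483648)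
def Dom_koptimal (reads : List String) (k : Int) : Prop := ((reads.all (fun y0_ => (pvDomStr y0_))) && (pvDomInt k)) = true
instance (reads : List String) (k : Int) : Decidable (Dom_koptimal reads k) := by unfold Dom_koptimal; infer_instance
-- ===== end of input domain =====

-- B replaces A's two sets and set comparison by a single dict of 2-bit flags per (k-1)-mer,
-- sliced directly at shifted indices (bit 1 = occurs as a k-mer suffix, bit 2 = as a k-mer
-- prefix); the sets are equal iff every flag is 3.  Objective: alternative data structure.

-- ===== PORT A =====
def koptimal (reads : List String) (k : Int) : Bool :=
  let kmers : PySem.Set String :=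
    reads.foldl (fun km read =>
      (PySem.List.pyRange 0 (PySem.Str.len read - k + 1) 1).foldl
        (fun km i => PySem.Set.add km (PySem.Str.slice read (some i) (some (i + k)))) km)
      PySem.Set.empty
  let sp : PySem.Set String × PySem.Set String :=
    kmers.foldl (fun sp kmer =>
      (PySem.Set.add sp.1 (PySem.Str.slice kmer (some 1) none),
       PySem.Set.add sp.2 (PySem.Str.slice kmer none (some (-1)))))
      (PySem.Set.empty, PySem.Set.empty)
  PySem.Set.equal sp.1 sp.2

-- ===== PORT B =====
def koptimal_alt (reads : List String) (k : Int) : Bool :=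
  let m := k - 1
  let flags : PySem.Dict String Int :=
    reads.foldl (fun flags read =>
      let n := PySem.Str.len read
      let flags := (PySem.List.pyRange 1 (n - k + 2) 1).foldl
        (fun d j => d.modify (PySem.Str.slice read (some j) (some (j + m))) 0
          (fun v => PySem.Int.bor v 1)) flags
      (PySem.List.pyRange 0 (n - k + 1) 1).foldl
        (fun d j => d.modify (PySem.Str.slice read (some j) (some (j + m))) 0
          (fun v => PySem.Int.bor v 2)) flags)
      PySem.Dict.empty
  flags.values.all (fun v => v == 3)

-- ===== PRECONDITION & SPEC =====
-- Pre_ restricts to the natural k-mer domain k ≥ 1: for k ≤ 0 A still returns a Bool, but one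
-- produced by Python's negative/empty slice accidents on read[i:i+k], which B's shifted
-- (k-1)-mer slicing deliberately does not reproduce.
def Pre_koptimal (reads : List String) (k : Int) : Prop := 1 ≤ k
instance (reads : List String) (k : Int) : Decidable (Pre_koptimal reads k) := by unfold Pre_koptimal; infer_instance
def pvWitness_koptimal : List String × Int := (["abab", "bab"], 2)

def Spec_koptimal (reads : List String) (k : Int) (out : Bool) : Prop := out = koptimal_alt reads k
instance (reads : List String) (k : Int) (out : Bool) : Decidable (Spec_koptimal reads k out) := by unfold Spec_koptimal; infer_instance

-- ===== CLAIM (what is proved, stated in full; the proofs are below) =====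
def Claim_equal_koptimal : Prop := ∀ (reads : List String) (k : Int), Dom_koptimal reads k → Pre_koptimal reads k → Spec_koptimal reads k (koptimal reads k)

-- ===== LEMMAS AND PROOFS =====

-- ---- A-side membership characterisation (sets built by folds of Set.add) ----

theorem pv_mem_foldl_add {β : Type} (l : List β) (f : β → String) (s : PySem.Set String) (x : String) :
    (x ∈ l.foldl (fun s e => PySem.Set.add s (f e)) s) ↔ x ∈ s ∨ ∃ e ∈ l, f e = x := by
  induction l generalizing s with
  | nil => simp
  | cons a t ih => simp [List.foldl_cons, ih, PySem.Set.mem_add]; tauto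

theorem pv_mem_foldl_foldl_add (reads : List String) (g : String → List Int)
    (f : String → Int → String) (s : PySem.Set String) (x : String) :
    (x ∈ reads.foldl (fun km read => (g read).foldl (fun km i => PySem.Set.add km (f read i)) km) s)
      ↔ x ∈ s ∨ ∃ r ∈ reads, ∃ i ∈ g r, f r i = x := by
  induction reads generalizing s with
  | nil => simp
  | cons a t ih =>
    rw [List.foldl_cons, ih, pv_mem_foldl_add]
    simp only [List.mem_cons, or_assoc]
    constructor
    · rintro (h | ⟨e, he, rfl⟩ | ⟨r, hr, i, hi, rfl⟩)
      · exact Or.inl h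
      · exact Or.inr ⟨a, Or.inl rfl, e, he, rfl⟩
      · exact Or.inr ⟨r, Or.inr hr, i, hi, rfl⟩
    · rintro (h | ⟨r, (rfl | hr), i, hi, rfl⟩)
      · exact Or.inl h
      · exact Or.inr (Or.inl ⟨i, hi, rfl⟩)
      · exact Or.inr (Or.inr ⟨r, hr, i, hi, rfl⟩)

theorem pv_pair_fold {β σ₁ σ₂ : Type} (l : List β) (F : σ₁ → β → σ₁) (G : σ₂ → β → σ₂)
    (s : σ₁ × σ₂) :
    l.foldl (fun sp e => (F sp.1 e, G sp.2 e)) s = (l.foldl F s.1, l.foldl G s.2) := by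
  obtain ⟨a, b⟩ := s
  exact PySem.List.foldl_prod_mk F G l a b

theorem pvCollapse (reads : List String) (g : String → List Int)
    (f : String → Int → String) (h : String → String) (x : String) :
    (x ∈ ((reads.foldl (fun km read => (g read).foldl (fun km i => PySem.Set.add km (f read i)) km)
          PySem.Set.empty).foldl (fun s kmer => PySem.Set.add s (h kmer)) PySem.Set.empty))
      ↔ ∃ r ∈ reads, ∃ i ∈ g r, h (f r i) = x := by
  rw [pv_mem_foldl_add]
  simp only [pv_mem_foldl_foldl_add]
  simp only [PySem.Set.empty, List.not_mem_nil, false_or]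
  constructor
  · rintro ⟨e, ⟨r, hr, i, hi, rfl⟩, rfl⟩
    exact ⟨r, hr, i, hi, rfl⟩
  · rintro ⟨r, hr, i, hi, rfl⟩
    exact ⟨_, ⟨r, hr, i, hi, rfl⟩, rfl⟩

theorem pvAchar (reads : List String) (k : Int) :
    (koptimal reads k = true) ↔ ∀ x : String,
      (∃ r ∈ reads, ∃ i ∈ PySem.List.pyRange 0 (PySem.Str.len r - k + 1) 1,
          PySem.Str.slice (PySem.Str.slice r (some i) (some (i + k))) (some 1) none = x)
        ↔ (∃ r ∈ reads, ∃ i ∈ PySem.List.pyRange 0 (PySem.Str.len r - k + 1) 1,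
          PySem.Str.slice (PySem.Str.slice r (some i) (some (i + k))) none (some (-1)) = x) := by
  simp only [koptimal]
  rw [pv_pair_fold _ (fun s kmer => PySem.Set.add s (PySem.Str.slice kmer (some 1) none))
    (fun s kmer => PySem.Set.add s (PySem.Str.slice kmer none (some (-1)))),
    PySem.Set.equal_iff]
  exact forall_congr' fun x => iff_congr (pvCollapse _ _ _ _ x) (pvCollapse _ _ _ _ x)

-- ---- B-side: the flags dict ----

-- flag value from the two "seen" bits
def pvVal (a b : Bool) : Int :=
  PySem.Int.bor (if a then 1 else 0) (if b then 2 else 0)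

theorem pvVal_bor_one (a b : Bool) : PySem.Int.bor (pvVal a b) 1 = pvVal true b := by
  cases a <;> cases b <;> decide

theorem pvVal_bor_two (a b : Bool) : PySem.Int.bor (pvVal a b) 2 = pvVal a true := by
  cases a <;> cases b <;> decide

theorem pvVal_eq_three (a b : Bool) : (pvVal a b == 3) = (a && b) := by
  cases a <;> cases b <;> decide

-- one inner loop setting bit 1
theorem pvFoldBit1 (L : List Int) (key : Int → String) (d : PySem.Dict String Int)
    (sa pa : String → Bool) (hg : ∀ y, d.getD y 0 = pvVal (sa y) (pa y)) (x : String) :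
    (L.foldl (fun d j => d.modify (key j) 0 (fun v => PySem.Int.bor v 1)) d).getD x 0
      = pvVal (sa x || L.any (fun j => key j == x)) (pa x) := by
  induction L generalizing d sa with
  | nil => simp [hg]
  | cons j t ih =>
    rw [List.foldl_cons]
    have step : ∀ y, (d.modify (key j) 0 (fun v => PySem.Int.bor v 1)).getD y 0
        = pvVal (sa y || (key j == y)) (pa y) := by
      intro y
      rw [PySem.Dict.getD_modify]
      by_cases hy : y = key j
      · subst hy; simp [hg, pvVal_bor_one]
      · have hb : (key j == y) = false := by
          simp only [beq_eq_false_iff_ne, ne_eq]; exact fun h => hy h.symm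
        simp [hy, hg, hb]
    rw [ih (d.modify (key j) 0 (fun v => PySem.Int.bor v 1)) (fun y => sa y || (key j == y)) step]
    simp [Bool.or_assoc]

-- one inner loop setting bit 2
theorem pvFoldBit2 (L : List Int) (key : Int → String) (d : PySem.Dict String Int)
    (sa pa : String → Bool) (hg : ∀ y, d.getD y 0 = pvVal (sa y) (pa y)) (x : String) :
    (L.foldl (fun d j => d.modify (key j) 0 (fun v => PySem.Int.bor v 2)) d).getD x 0
      = pvVal (sa x) (pa x || L.any (fun j => key j == x)) := by
  induction L generalizing d pa with
  | nil => simp [hg]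
  | cons j t ih =>
    rw [List.foldl_cons]
    have step : ∀ y, (d.modify (key j) 0 (fun v => PySem.Int.bor v 2)).getD y 0
        = pvVal (sa y) (pa y || (key j == y)) := by
      intro y
      rw [PySem.Dict.getD_modify]
      by_cases hy : y = key j
      · subst hy; simp [hg, pvVal_bor_two]
      · have hb : (key j == y) = false := by
          simp only [beq_eq_false_iff_ne, ne_eq]; exact fun h => hy h.symm
        simp [hy, hg, hb]
    rw [ih (d.modify (key j) 0 (fun v => PySem.Int.bor v 2)) (fun y => pa y || (key j == y)) step]
    simp [Bool.or_assoc]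

-- keys of one inner loop
theorem pvFoldKeys (L : List Int) (key : Int → String) (b : Int) (d : PySem.Dict String Int)
    (x : String) :
    (x ∈ (L.foldl (fun d j => d.modify (key j) 0 (fun v => PySem.Int.bor v b)) d).keys)
      ↔ x ∈ d.keys ∨ L.any (fun j => key j == x) = true := by
  rw [PySem.Dict.keys_foldl_modify_key L key 0 (fun _ _ v => PySem.Int.bor v b) d,
    PySem.Set.mem_update]
  simp only [List.any_eq_true, List.mem_map, beq_iff_eq]

-- the suffix / prefix "seen" booleans of B
def pvSufB (k : Int) (reads : List String) (x : String) : Bool :=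
  reads.any (fun r => (PySem.List.pyRange 1 (PySem.Str.len r - k + 2) 1).any
    (fun j => PySem.Str.slice r (some j) (some (j + (k - 1))) == x))

def pvPreB (k : Int) (reads : List String) (x : String) : Bool :=
  reads.any (fun r => (PySem.List.pyRange 0 (PySem.Str.len r - k + 1) 1).any
    (fun j => PySem.Str.slice r (some j) (some (j + (k - 1))) == x))

-- the whole accumulation of B's flags dict
theorem pvMain (k : Int) (reads : List String) :
    ∀ (d : PySem.Dict String Int) (sa pa : String → Bool),
      d.keys.Nodup →
      (∀ y, (y ∈ d.keys) ↔ (sa y || pa y) = true) →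
      (∀ y, d.getD y 0 = pvVal (sa y) (pa y)) →
      (reads.foldl (fun flags read =>
          (PySem.List.pyRange 0 (PySem.Str.len read - k + 1) 1).foldl
            (fun d j => d.modify (PySem.Str.slice read (some j) (some (j + (k - 1)))) 0
              (fun v => PySem.Int.bor v 2))
            ((PySem.List.pyRange 1 (PySem.Str.len read - k + 2) 1).foldl
              (fun d j => d.modify (PySem.Str.slice read (some j) (some (j + (k - 1)))) 0
                (fun v => PySem.Int.bor v 1)) flags)) d).keys.Nodup ∧
      (∀ y, (y ∈ (reads.foldl (fun flags read =>
          (PySem.List.pyRange 0 (PySem.Str.len read - k + 1) 1).foldl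
            (fun d j => d.modify (PySem.Str.slice read (some j) (some (j + (k - 1)))) 0
              (fun v => PySem.Int.bor v 2))
            ((PySem.List.pyRange 1 (PySem.Str.len read - k + 2) 1).foldl
              (fun d j => d.modify (PySem.Str.slice read (some j) (some (j + (k - 1)))) 0
                (fun v => PySem.Int.bor v 1)) flags)) d).keys)
        ↔ ((sa y || pvSufB k reads y) || (pa y || pvPreB k reads y)) = true) ∧
      (∀ y, (reads.foldl (fun flags read =>
          (PySem.List.pyRange 0 (PySem.Str.len read - k + 1) 1).foldl
            (fun d j => d.modify (PySem.Str.slice read (some j) (some (j + (k - 1)))) 0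
              (fun v => PySem.Int.bor v 2))
            ((PySem.List.pyRange 1 (PySem.Str.len read - k + 2) 1).foldl
              (fun d j => d.modify (PySem.Str.slice read (some j) (some (j + (k - 1)))) 0
                (fun v => PySem.Int.bor v 1)) flags)) d).getD y 0
        = pvVal (sa y || pvSufB k reads y) (pa y || pvPreB k reads y)) := by
  induction reads with
  | nil =>
    intro d sa pa hnd hk hg
    refine ⟨hnd, ?_, ?_⟩ <;> intro y <;> simp [pvSufB, pvPreB, hk, hg]
  | cons r t ih =>
    intro d sa pa hnd hk hg
    have hg1 := pvFoldBit1 (PySem.List.pyRange 1 (PySem.Str.len r - k + 2) 1)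
      (fun j => PySem.Str.slice r (some j) (some (j + (k - 1)))) d sa pa hg
    have hg2 := pvFoldBit2 (PySem.List.pyRange 0 (PySem.Str.len r - k + 1) 1)
      (fun j => PySem.Str.slice r (some j) (some (j + (k - 1)))) _
      (fun y => sa y || (PySem.List.pyRange 1 (PySem.Str.len r - k + 2) 1).any
        (fun j => PySem.Str.slice r (some j) (some (j + (k - 1))) == y)) pa hg1
    have hnd2 := PySem.Dict.nodup_keys_foldl_modify_key
      (PySem.List.pyRange 0 (PySem.Str.len r - k + 1) 1)
      (fun j => PySem.Str.slice r (some j) (some (j + (k - 1)))) 0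
      (fun _ _ v => PySem.Int.bor v 2) _
      (PySem.Dict.nodup_keys_foldl_modify_key
        (PySem.List.pyRange 1 (PySem.Str.len r - k + 2) 1)
        (fun j => PySem.Str.slice r (some j) (some (j + (k - 1)))) 0
        (fun _ _ v => PySem.Int.bor v 1) d hnd)
    have hk2 : ∀ y, (y ∈ ((PySem.List.pyRange 0 (PySem.Str.len r - k + 1) 1).foldl
          (fun d j => d.modify (PySem.Str.slice r (some j) (some (j + (k - 1)))) 0
            (fun v => PySem.Int.bor v 2))
          ((PySem.List.pyRange 1 (PySem.Str.len r - k + 2) 1).foldl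
            (fun d j => d.modify (PySem.Str.slice r (some j) (some (j + (k - 1)))) 0
              (fun v => PySem.Int.bor v 1)) d)).keys)
        ↔ ((fun y => sa y || (PySem.List.pyRange 1 (PySem.Str.len r - k + 2) 1).any
              (fun j => PySem.Str.slice r (some j) (some (j + (k - 1))) == y)) y
          || (fun y => pa y || (PySem.List.pyRange 0 (PySem.Str.len r - k + 1) 1).any
              (fun j => PySem.Str.slice r (some j) (some (j + (k - 1))) == y)) y) = true := by
      intro y
      rw [pvFoldKeys, pvFoldKeys]
      simp only [hk, Bool.or_eq_true]
      tauto
    obtain ⟨N, K, G⟩ := ih _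
      (fun y => sa y || (PySem.List.pyRange 1 (PySem.Str.len r - k + 2) 1).any
        (fun j => PySem.Str.slice r (some j) (some (j + (k - 1))) == y))
      (fun y => pa y || (PySem.List.pyRange 0 (PySem.Str.len r - k + 1) 1).any
        (fun j => PySem.Str.slice r (some j) (some (j + (k - 1))) == y))
      hnd2 hk2 hg2
    refine ⟨?_, ?_, ?_⟩
    · simp only [List.foldl_cons]
      exact N
    · intro y
      simp only [List.foldl_cons]
      rw [K y]
      simp only [pvSufB, pvPreB, List.any_cons]
      simp [Bool.or_assoc]
    · intro y
      simp only [List.foldl_cons]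
      rw [G y]
      simp only [pvSufB, pvPreB, List.any_cons]
      simp [Bool.or_assoc]

theorem pvBchar (reads : List String) (k : Int) :
    (koptimal_alt reads k = true) ↔
      ∀ x : String, pvSufB k reads x = true ↔ pvPreB k reads x = true := by
  obtain ⟨N, K, G⟩ := pvMain k reads PySem.Dict.empty (fun _ => false) (fun _ => false)
    PySem.Dict.nodup_keys_empty
    (by intro y; simp [PySem.Dict.keys_empty])
    (by intro y; rw [PySem.Dict.getD_empty]; show (0 : Int) = pvVal false false; decide)
  simp only [koptimal_alt]
  rw [List.all_eq_true, PySem.Dict.values_eq_map_keys _ N 0]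
  simp only [Bool.false_or] at K G
  constructor
  · intro h x
    constructor
    · intro hs
      have hx : x ∈ _ := (K x).mpr (by simp [hs])
      have := h _ (List.mem_map.mpr ⟨x, hx, rfl⟩)
      rw [G x, pvVal_eq_three] at this
      simp only [Bool.and_eq_true] at this
      exact this.2
    · intro hp
      have hx : x ∈ _ := (K x).mpr (by simp [hp])
      have := h _ (List.mem_map.mpr ⟨x, hx, rfl⟩)
      rw [G x, pvVal_eq_three] at this
      simp only [Bool.and_eq_true] at this
      exact this.1
  · intro h v hv
    obtain ⟨x, hx, rfl⟩ := List.mem_map.mp hv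
    rw [G x, pvVal_eq_three]
    have := (K x).mp hx
    rcases Bool.or_eq_true_iff.mp this with hs | hp
    · simp [hs, (h x).mp hs]
    · simp [hp, (h x).mpr hp]

-- ---- slice identities (1 ≤ k): kmer[1:] / kmer[:-1] are direct slices of the read ----

theorem pvStrExt {s t : String} (h : s.toList = t.toList) : s = t := by
  have h2 := congrArg String.ofList h
  simpa [String.ofList_toList] using h2

theorem pvSliceSuf (r : String) (k i : Int) (hk : 1 ≤ k) (h0 : 0 ≤ i)
    (_hi : i + k ≤ PySem.Str.len r) :
    PySem.Str.slice (PySem.Str.slice r (some i) (some (i + k))) (some 1) none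
      = PySem.Str.slice r (some (i + 1)) (some ((i + 1) + (k - 1))) := by
  apply pvStrExt
  have h2 : (i + 1) + (k - 1) = i + k := by ring
  rw [h2]
  simp only [PySem.Str.toList_slice, PySem.Chars.slice]
  rw [PySem.List.slice_toNat _ h0 (by omega),
    PySem.List.slice_from _ (by norm_num),
    PySem.List.slice_toNat _ (by omega) (by omega)]
  rw [List.drop_take, List.drop_drop]
  simp only [Int.toNat_one]
  have e1 : (i + 1).toNat = i.toNat + 1 := by omega
  rw [e1]
  congr 1

theorem pvSlicePre (r : String) (k i : Int) (hk : 1 ≤ k) (h0 : 0 ≤ i)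
    (hi : i + k ≤ PySem.Str.len r) :
    PySem.Str.slice (PySem.Str.slice r (some i) (some (i + k))) none (some (-1))
      = PySem.Str.slice r (some i) (some (i + (k - 1))) := by
  apply pvStrExt
  have hn := PySem.Str.len_eq r
  rw [hn] at hi
  simp only [PySem.Str.toList_slice, PySem.Chars.slice]
  rw [PySem.List.slice_toNat _ h0 (by omega),
    PySem.List.slice_to_neg_one,
    PySem.List.slice_toNat _ h0 (by omega)]
  rw [List.dropLast_eq_take, List.length_take, List.length_drop, List.take_take]
  congr 1
  omega

-- ---- existential bridges per read ----

theorem pvBridgeSuf (k : Int) (hk : 1 ≤ k) (r x : String) :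
    (∃ i ∈ PySem.List.pyRange 0 (PySem.Str.len r - k + 1) 1,
        PySem.Str.slice (PySem.Str.slice r (some i) (some (i + k))) (some 1) none = x)
      ↔ (∃ j ∈ PySem.List.pyRange 1 (PySem.Str.len r - k + 2) 1,
        PySem.Str.slice r (some j) (some (j + (k - 1))) = x) := by
  constructor
  · rintro ⟨i, hi, rfl⟩
    rw [PySem.List.mem_pyRange_one] at hi
    refine ⟨i + 1, PySem.List.mem_pyRange_one.mpr (by omega), ?_⟩
    rw [pvSliceSuf r k i hk hi.1 (by omega)]
  · rintro ⟨j, hj, rfl⟩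
    rw [PySem.List.mem_pyRange_one] at hj
    refine ⟨j - 1, PySem.List.mem_pyRange_one.mpr (by omega), ?_⟩
    have e : j - 1 + 1 = j := by ring
    rw [pvSliceSuf r k (j - 1) hk (by omega) (by omega), e]

theorem pvBridgePre (k : Int) (hk : 1 ≤ k) (r x : String) :
    (∃ i ∈ PySem.List.pyRange 0 (PySem.Str.len r - k + 1) 1,
        PySem.Str.slice (PySem.Str.slice r (some i) (some (i + k))) none (some (-1)) = x)
      ↔ (∃ j ∈ PySem.List.pyRange 0 (PySem.Str.len r - k + 1) 1,
        PySem.Str.slice r (some j) (some (j + (k - 1))) = x) := by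
  constructor
  · rintro ⟨i, hi, rfl⟩
    have h := PySem.List.mem_pyRange_one.mp hi
    exact ⟨i, hi, (pvSlicePre r k i hk h.1 (by omega)).symm⟩
  · rintro ⟨j, hj, rfl⟩
    have h := PySem.List.mem_pyRange_one.mp hj
    exact ⟨j, hj, pvSlicePre r k j hk h.1 (by omega)⟩

-- ===== VERDICT (by name: the statement is the Claim_ definition above) =====
theorem koptimal_spec : Claim_equal_koptimal := by
  intro reads k _ hpre
  have hk : (1 : Int) ≤ k := hpre
  show koptimal reads k = koptimal_alt reads k
  rw [Bool.eq_iff_iff, pvAchar, pvBchar]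
  have hs : ∀ x : String, pvSufB k reads x = true ↔
      (∃ r ∈ reads, ∃ i ∈ PySem.List.pyRange 0 (PySem.Str.len r - k + 1) 1,
        PySem.Str.slice (PySem.Str.slice r (some i) (some (i + k))) (some 1) none = x) := by
    intro x
    simp only [pvSufB, List.any_eq_true, beq_iff_eq]
    exact exists_congr fun r => and_congr_right fun _ => (pvBridgeSuf k hk r x).symm
  have hp : ∀ x : String, pvPreB k reads x = true ↔
      (∃ r ∈ reads, ∃ i ∈ PySem.List.pyRange 0 (PySem.Str.len r - k + 1) 1,
        PySem.Str.slice (PySem.Str.slice r (some i) (some (i + k))) none (some (-1)) = x) := by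
    intro x
    simp only [pvPreB, List.any_eq_true, beq_iff_eq]
    exact exists_congr fun r => and_congr_right fun _ => (pvBridgePre k hk r x).symm
  exact (forall_congr' fun x => iff_congr (hs x) (hp x)).symm
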